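-- pv_equiv track=rewrite | github.com/peterpei666/leetcode_python | 3819. Rotate Non Negative Elements.py | rotateElements
-- ===== SOURCE A (Python) =====
-- from typing import List
--
-- def rotateElements(nums: List[int], k: int) -> List[int]:
--     n = len(nums)
--     pos = [nums[i] for i in range(n) if nums[i] >= 0]
--     if not pos:
--         return nums
--     sz = len(pos)
--     j = 0
--     for i in range(n):
--         if nums[i] >= 0:
--             nums[i] = pos[(j + k) % sz]
--             j += 1
--     return nums
-- ===== SOURCE B (Python) =====
-- from typing import List
--
-- def rotateElements(nums: List[int], k: int) -> List[int]:
--     vals = [v for v in nums if v >= 0]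
--     sz = len(vals)
--     if sz == 0:
--         return nums
--
--     def rev(lo: int, hi: int) -> None:
--         # reverse vals[lo:hi] in place with two pointers
--         hi -= 1
--         while lo < hi:
--             vals[lo], vals[hi] = vals[hi], vals[lo]
--             lo += 1
--             hi -= 1
--
--     s = k % sz
--     rev(0, s)
--     rev(s, sz)
--     rev(0, sz)
--     it = iter(vals)
--     for i, v in enumerate(nums):
--         if v >= 0:
--             nums[i] = next(it)
--     return nums
-- ===== Notes on version B (the rewrite author's own statement) =====
-- stated objective: alternative
-- what changed: Replaces A's modular-index gather (nums[i] = pos[(j+k)%sz]) with the classic triple-reversal rotation algorithm: three in-place two-pointer reversals of the non-negative value buffer, followed by a sequential iterator write-back with no modular arithmetic in the write loop.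
import Mathlib
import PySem

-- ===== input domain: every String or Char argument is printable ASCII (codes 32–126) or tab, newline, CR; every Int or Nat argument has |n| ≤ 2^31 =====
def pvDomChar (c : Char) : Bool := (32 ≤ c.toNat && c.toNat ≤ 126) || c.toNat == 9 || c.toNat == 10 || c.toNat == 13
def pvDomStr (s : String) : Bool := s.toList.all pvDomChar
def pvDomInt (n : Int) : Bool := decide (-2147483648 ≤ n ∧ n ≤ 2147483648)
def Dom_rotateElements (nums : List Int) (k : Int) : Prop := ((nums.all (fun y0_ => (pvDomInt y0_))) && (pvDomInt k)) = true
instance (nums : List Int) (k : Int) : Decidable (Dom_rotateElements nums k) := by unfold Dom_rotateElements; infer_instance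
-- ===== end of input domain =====

-- B replaces A's modular-index gather by the classic triple-reversal rotation: three in-place
-- two-pointer reversals of the non-negative value buffer, then a sequential write-back
-- (alternative algorithm, same cost). Python A and B both mutate nums in place; the
-- equivalence proved is about the returned value (which is that same list).


-- ===== PORT A =====
def rotateElements (nums : List Int) (k : Int) : List Int :=
  let n : Int := (nums.length : Int)
  let pos : List Int := (PySem.List.pyRange 0 n 1).foldl
    (fun acc i => if PySem.List.pyGetD nums i 0 ≥ 0 then acc ++ [PySem.List.pyGetD nums i 0] else acc) []
  if pos = [] then nums
  else
    let sz : Int := (pos.length : Int)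
    ((PySem.List.pyRange 0 n 1).foldl
      (fun (st : List Int × Int) i =>
        if PySem.List.pyGetD st.1 i 0 ≥ 0 then
          (PySem.List.pySetD st.1 i (PySem.List.pyGetD pos (PySem.Int.mod (st.2 + k) sz) 0), st.2 + 1)
        else st)
      (nums, 0)).1

-- ===== PORT B =====
-- Python's 'rev(lo, hi)' first does 'hi -= 1', then the two-pointer swap loop; revLoop is that
-- loop (hi inclusive).  The tuple swap reads both cells of the ORIGINAL list before writing.
def revLoop (vals : List Int) (lo hi : Int) : List Int :=
  if lo < hi then
    revLoop
      (PySem.List.pySetD (PySem.List.pySetD vals lo (PySem.List.pyGetD vals hi 0)) hi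
        (PySem.List.pyGetD vals lo 0))
      (lo + 1) (hi - 1)
  else vals
termination_by (hi - lo).toNat
decreasing_by omega

def stepB (st : List Int × List Int) (p : Int × Int) : List Int × List Int :=
  if p.2 ≥ 0 then
    match st.2 with
    | r :: rs => (PySem.List.pySetD st.1 p.1 r, rs)
    | [] => st
  else st

def rotateElements_alt (nums : List Int) (k : Int) : List Int :=
  let vals : List Int := nums.foldl (fun acc v => if v ≥ 0 then acc ++ [v] else acc) []
  let sz : Int := (vals.length : Int)
  if sz = 0 then nums
  else
    let s := PySem.Int.mod k sz
    let v1 := revLoop vals 0 (s - 1)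
    let v2 := revLoop v1 s (sz - 1)
    let v3 := revLoop v2 0 (sz - 1)
    -- 'it = iter(v3); for i, v in enumerate(nums): if v >= 0: nums[i] = next(it)'
    -- (stepB's [] branch is a totality guard; next() never exhausts here)
    ((PySem.List.enumerate nums 0).foldl stepB (nums, v3)).1

-- ===== PRECONDITION & SPEC =====
def Spec_rotateElements (nums : List Int) (k : Int) (out : List Int) : Prop := out = rotateElements_alt nums k
instance (nums : List Int) (k : Int) (out : List Int) : Decidable (Spec_rotateElements nums k out) := by unfold Spec_rotateElements; infer_instance

-- ===== CLAIM (what is proved, stated in full; the proofs are below) =====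
def Claim_equal_rotateElements : Prop := ∀ (nums : List Int) (k : Int), Dom_rotateElements nums k → Spec_rotateElements nums k (rotateElements nums k)

-- ===== LEMMAS AND PROOFS =====

-- A's write loop, expressed structurally: occurrence j of a non-negative element receives
-- pos[(j + k) mod sz].
def refRot (pos : List Int) (sz k : Int) : List Int → Int → List Int
  | [], _ => []
  | x :: xs, j =>
    if x ≥ 0 then PySem.List.pyGetD pos (PySem.Int.mod (j + k) sz) 0 :: refRot pos sz k xs (j + 1)
    else x :: refRot pos sz k xs j

-- sequential scatter of a value list into the non-negative slots
def writeBack : List Int → List Int → List Int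
  | [], _ => []
  | x :: xs, [] => x :: xs
  | x :: xs, r :: rs => if x ≥ 0 then r :: writeBack xs rs else x :: writeBack xs (r :: rs)

theorem lemA (pos : List Int) (sz k : Int) (suf : List Int) : ∀ (pre : List Int) (j : Int),
    (PySem.List.pyRange (pre.length : Int) ((pre.length : Int) + (suf.length : Int)) 1).foldl
      (fun (st : List Int × Int) i =>
        if PySem.List.pyGetD st.1 i 0 ≥ 0 then
          (PySem.List.pySetD st.1 i (PySem.List.pyGetD pos (PySem.Int.mod (st.2 + k) sz) 0), st.2 + 1)
        else st)
      (pre ++ suf, j)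
    = (pre ++ refRot pos sz k suf j, j + (suf.countP (fun x => decide (x ≥ 0)) : Int)) := by
  induction suf with
  | nil =>
    intro pre j
    rw [PySem.List.pyRange_one_eq_nil (by simp)]
    simp [refRot]
  | cons x xs ih =>
    intro pre j
    rw [PySem.List.pyRange_one_cons (by simp only [List.length_cons]; push_cast; omega)]
    simp only [List.foldl_cons]
    have hget : PySem.List.pyGetD (pre ++ x :: xs) (pre.length : Int) 0 = x := by
      simp [PySem.List.pyGetD_natCast, List.getD]
    rw [hget]
    by_cases hx : x ≥ 0
    · rw [if_pos hx]
      have hset : PySem.List.pySetD (pre ++ x :: xs) (pre.length : Int)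
          (PySem.List.pyGetD pos (PySem.Int.mod (j + k) sz) 0)
          = (pre ++ [PySem.List.pyGetD pos (PySem.Int.mod (j + k) sz) 0]) ++ xs := by
        simp [PySem.List.pySetD_natCast]
      simp only [hset]
      have h1 : ((pre.length : Int) + 1) = ((pre ++ [PySem.List.pyGetD pos (PySem.Int.mod (j + k) sz) 0]).length : Int) := by
        push_cast; simp
      have h2 : ((pre.length : Int) + ((x :: xs).length : Int))
          = ((pre ++ [PySem.List.pyGetD pos (PySem.Int.mod (j + k) sz) 0]).length : Int) + (xs.length : Int) := by
        push_cast; simp; omega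
      rw [h1, h2, ih]
      simp [refRot, hx, List.countP_cons]
      omega
    · rw [if_neg hx]
      have hset : (pre ++ x :: xs) = (pre ++ [x]) ++ xs := by simp
      rw [hset]
      have h1 : ((pre.length : Int) + 1) = ((pre ++ [x]).length : Int) := by push_cast; simp
      have h2 : ((pre.length : Int) + ((x :: xs).length : Int))
          = ((pre ++ [x]).length : Int) + (xs.length : Int) := by push_cast; simp; omega
      rw [h1, h2, ih]
      simp [refRot, hx, List.countP_cons]

theorem writeBack_nil (xs : List Int) : writeBack xs [] = xs := by
  cases xs <;> rfl

theorem writeBack_neg {x : Int} (xs rs : List Int) (hx : ¬ x ≥ 0) :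
    writeBack (x :: xs) rs = x :: writeBack xs rs := by
  cases rs <;> simp [writeBack, hx, writeBack_nil]

-- B's write loop (state = current list × remaining iterator) is the sequential scatter
theorem lemB (suf : List Int) : ∀ (pre : List Int) (rot : List Int),
    ((PySem.List.enumerate suf (pre.length : Int)).foldl stepB (pre ++ suf, rot)).1
      = pre ++ writeBack suf rot := by
  induction suf with
  | nil => intro pre rot; simp [PySem.List.enumerate_nil, writeBack]
  | cons x xs ih =>
    intro pre rot
    rw [PySem.List.enumerate_cons]
    simp only [List.foldl_cons]
    by_cases hx : x ≥ 0
    · cases rot with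
      | nil =>
        have hstep : stepB (pre ++ x :: xs, []) ((pre.length : Int), x) = (pre ++ x :: xs, []) := by
          simp [stepB, hx]
        rw [hstep]
        have hsp : (pre ++ x :: xs) = (pre ++ [x]) ++ xs := by simp
        rw [hsp]
        have h1 : ((pre.length : Int) + 1) = ((pre ++ [x]).length : Int) := by push_cast; simp
        rw [h1, ih]
        simp [writeBack, hx, writeBack_nil]
      | cons r rs =>
        have hstep : stepB (pre ++ x :: xs, r :: rs) ((pre.length : Int), x)
            = ((pre ++ [r]) ++ xs, rs) := by
          simp [stepB, hx, PySem.List.pySetD_natCast]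
        rw [hstep]
        have h1 : ((pre.length : Int) + 1) = ((pre ++ [r]).length : Int) := by push_cast; simp
        rw [h1, ih]
        simp [writeBack, hx]
    · have hstep : stepB (pre ++ x :: xs, rot) ((pre.length : Int), x) = (pre ++ x :: xs, rot) := by
        simp [stepB, hx]
      rw [hstep]
      have hsp : (pre ++ x :: xs) = (pre ++ [x]) ++ xs := by simp
      rw [hsp]
      have h1 : ((pre.length : Int) + 1) = ((pre ++ [x]).length : Int) := by push_cast; simp
      rw [h1, ih, writeBack_neg _ _ hx]
      simp

-- the scatter of A's gather list reproduces A's structural write loop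
theorem lemRef (pos : List Int) (sz k : Int) (xs : List Int) : ∀ (j : Int),
    writeBack xs (((PySem.List.pyRange j (j + (xs.countP (fun x => decide (x ≥ 0)) : Int)) 1)).map
      (fun t => PySem.List.pyGetD pos (PySem.Int.mod (t + k) sz) 0))
    = refRot pos sz k xs j := by
  induction xs with
  | nil => intro j; simp [refRot, PySem.List.pyRange_one_eq_nil, writeBack]
  | cons x xs ih =>
    intro j
    by_cases hx : x ≥ 0
    · have hc : ((x :: xs).countP (fun x => decide (x ≥ 0)) : Int) = (xs.countP (fun x => decide (x ≥ 0)) : Int) + 1 := by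
        simp [List.countP_cons, hx]
      rw [hc, PySem.List.pyRange_one_cons (by omega)]
      simp only [List.map_cons]
      rw [show ∀ c : Int, j + (c + 1) = (j+1) + c from fun c => by omega]
      simp only [writeBack, hx, if_pos, refRot, ite_true]
      rw [ih]
    · have hc : ((x :: xs).countP (fun x => decide (x ≥ 0)) : Int) = (xs.countP (fun x => decide (x ≥ 0)) : Int) := by
        simp [List.countP_cons, hx]
      rw [hc, writeBack_neg _ _ hx, ih]
      simp [refRot, hx]

-- getD / set at the junction of an append
theorem getD_mid (as bs : List Int) (b d : Int) : (as ++ b :: bs).getD as.length d = b := by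
  induction as with
  | nil => rfl
  | cons a as ih => simpa using ih

theorem set_mid (as bs : List Int) (b c : Int) : (as ++ b :: bs).set as.length c = as ++ c :: bs := by
  induction as with
  | nil => rfl
  | cons a as ih => simpa using ih

-- the two-pointer swap loop reverses the middle segment
theorem revLoop_spec (n : Nat) : ∀ (mid pre suf : List Int), mid.length ≤ n →
    revLoop (pre ++ mid ++ suf) (pre.length : Int) ((pre.length : Int) + (mid.length : Int) - 1)
      = pre ++ mid.reverse ++ suf := by
  induction n with
  | zero =>
    intro mid pre suf hlen
    have : mid = [] := List.eq_nil_of_length_eq_zero (by omega)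
    subst this
    rw [revLoop, if_neg (by simp only [List.length_nil, List.length_cons]; push_cast; omega)]
    simp
  | succ n ih =>
    intro mid pre suf hlen
    cases mid with
    | nil => rw [revLoop, if_neg (by simp only [List.length_nil, List.length_cons]; push_cast; omega)]; simp
    | cons x t =>
      rcases List.eq_nil_or_concat t with rfl | ⟨m, y, rfl⟩
      · rw [revLoop, if_neg (by simp only [List.length_nil, List.length_cons]; push_cast; omega)]; simp
      · simp only [List.concat_eq_append] at hlen ⊢
        rw [revLoop]
        have hcond : (pre.length : Int) < (pre.length : Int) + ((x :: (m ++ [y])).length : Int) - 1 := by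
          simp only [List.length_cons, List.length_append, List.length_nil]; push_cast; omega
        rw [if_pos hcond]
        -- the list is pre ++ x :: (m ++ y :: suf) = (pre ++ x :: m) ++ y :: suf
        have hL : pre ++ (x :: (m ++ [y])) ++ suf = pre ++ x :: (m ++ y :: suf) := by simp
        have hL2 : pre ++ (x :: (m ++ [y])) ++ suf = (pre ++ x :: m) ++ y :: suf := by simp
        have hhi : (pre.length : Int) + ((x :: (m ++ [y])).length : Int) - 1
            = (((pre ++ x :: m).length : Nat) : Int) := by
          simp only [List.length_cons, List.length_append, List.length_nil]; push_cast; omega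
        have hgethi : PySem.List.pyGetD (pre ++ (x :: (m ++ [y])) ++ suf)
            ((pre.length : Int) + ((x :: (m ++ [y])).length : Int) - 1) 0 = y := by
          rw [hhi, hL2, PySem.List.pyGetD_natCast, getD_mid]
        have hgetlo : PySem.List.pyGetD (pre ++ (x :: (m ++ [y])) ++ suf) ((pre.length : Nat) : Int) 0 = x := by
          rw [PySem.List.pyGetD_natCast, hL, getD_mid]
        rw [hgethi, hgetlo]
        have hset1 : PySem.List.pySetD (pre ++ (x :: (m ++ [y])) ++ suf) ((pre.length : Nat) : Int) y
            = pre ++ y :: (m ++ y :: suf) := by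
          rw [PySem.List.pySetD_natCast, hL, set_mid]
        rw [hset1]
        have hset2 : PySem.List.pySetD (pre ++ y :: (m ++ y :: suf))
            ((pre.length : Int) + ((x :: (m ++ [y])).length : Int) - 1) x
            = (pre ++ y :: m) ++ x :: suf := by
          rw [hhi]
          have : pre ++ y :: (m ++ y :: suf) = (pre ++ y :: m) ++ y :: suf := by simp
          rw [this, PySem.List.pySetD_natCast]
          have hlen2 : (pre ++ x :: m).length = (pre ++ y :: m).length := by simp
          rw [hlen2, set_mid]
        rw [hset2]
        have hre : (pre ++ y :: m) ++ x :: suf = (pre ++ [y]) ++ m ++ ([x] ++ suf) := by simp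
        have hlo : (pre.length : Int) + 1 = (((pre ++ [y]).length : Nat) : Int) := by push_cast; simp
        have hhi2 : (pre.length : Int) + ((x :: (m ++ [y])).length : Int) - 1 - 1
            = (((pre ++ [y]).length : Nat) : Int) + ((m.length : Nat) : Int) - 1 := by
          simp only [List.length_cons, List.length_append, List.length_nil]
          push_cast; omega
        rw [hre, hlo, hhi2, ih m (pre ++ [y]) ([x] ++ suf) (by simp at hlen ⊢; omega)]
        simp

-- rotation left by s as drop ++ take equals A's gather list
theorem lemRot (vals : List Int) (k : Int) (h : vals ≠ []) :
    vals.drop (PySem.Int.mod k (vals.length : Int)).toNat ++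
      vals.take (PySem.Int.mod k (vals.length : Int)).toNat
    = (PySem.List.pyRange 0 (vals.length : Int) 1).map
        (fun t => PySem.List.pyGetD vals (PySem.Int.mod (t + k) (vals.length : Int)) 0) := by
  have hn : 0 < (vals.length : Int) := by
    cases vals with
    | nil => simp at h
    | cons a t => simp
  have h0 : 0 ≤ PySem.Int.mod k (vals.length : Int) := PySem.Int.mod_nonneg _ hn
  have hlt : PySem.Int.mod k (vals.length : Int) < (vals.length : Int) := PySem.Int.mod_lt _ hn
  set s : Nat := (PySem.Int.mod k (vals.length : Int)).toNat with hs
  have hsv : PySem.Int.mod k (vals.length : Int) = (s : Int) := by omega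
  have hslt : s < vals.length := by omega
  rw [PySem.List.pyRange_zero_natCast, List.map_map]
  apply List.ext_getElem
  · simp; omega
  · intro i h1 h2
    have hi : i < vals.length := by simpa using h2
    have hmod : PySem.Int.mod ((i : Int) + k) (vals.length : Int) = (((i + s) % vals.length : Nat) : Int) := by
      rw [PySem.Int.mod_eq_emod_of_pos hn]
      have hk : k % (vals.length : Int) = (s : Int) := by
        rw [← PySem.Int.mod_eq_emod_of_pos hn]; exact hsv
      have hss : (s : Int) % (vals.length : Int) = (s : Int) := Int.emod_eq_of_lt (by omega) (by omega)
      rw [Int.add_emod (i : Int) k, hk, ← hss, ← Int.add_emod]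
      push_cast
      rfl
    have hmlt : (i + s) % vals.length < vals.length := Nat.mod_lt _ (by omega)
    simp only [List.getElem_map, Function.comp_apply, List.getElem_range, hmod,
      PySem.List.pyGetD_natCast]
    rw [List.getD_eq_getElem _ _ hmlt]
    by_cases hc : i + s < vals.length
    · have hm : (i + s) % vals.length = s + i := by rw [Nat.mod_eq_of_lt hc]; omega
      rw [List.getElem_append_left (by simp; omega)]
      rw [List.getElem_drop]
      exact getElem_congr rfl hm.symm (by omega)
    · have hm : (i + s) % vals.length = i - (vals.length - s) := by
        rw [Nat.mod_eq_sub_mod (by omega), Nat.mod_eq_of_lt (by omega)]; omega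
      rw [List.getElem_append_right (by simp; omega)]
      rw [List.getElem_take]
      simp only [List.length_drop]
      exact getElem_congr rfl (by omega) (by omega)

theorem main (nums : List Int) (k : Int) :
    rotateElements nums k = rotateElements_alt nums k := by
  simp only [rotateElements, rotateElements_alt]
  have hpos : (PySem.List.pyRange 0 (nums.length : Int) 1).foldl
      (fun acc i => if PySem.List.pyGetD nums i 0 ≥ 0 then acc ++ [PySem.List.pyGetD nums i 0] else acc) []
      = nums.filter (fun v => decide (v ≥ 0)) := by
    rw [PySem.List.foldl_pyRange_zero_pyGetD' nums 0
      (fun acc v => if v ≥ 0 then acc ++ [v] else acc) []]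
    simpa using PySem.List.foldl_append_ite_eq_filter (fun v : Int => v ≥ 0) nums []
  have hvals : nums.foldl (fun acc v => if v ≥ 0 then acc ++ [v] else acc) ([] : List Int)
      = nums.filter (fun v => decide (v ≥ 0)) := by
    simpa using PySem.List.foldl_append_ite_eq_filter (fun v : Int => v ≥ 0) nums []
  rw [hpos, hvals]
  set F := nums.filter (fun v => decide (v ≥ 0)) with hF
  by_cases hFe : F = []
  · simp [hFe]
  · have hn : 0 < (F.length : Int) := by
      have := List.length_pos_iff.mpr hFe
      omega
    rw [if_neg hFe, if_neg (by omega : ¬ (F.length : Int) = 0)]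
    -- A side
    have hA := lemA F (F.length : Int) k nums [] 0
    simp only [List.length_nil, Nat.cast_zero, zero_add, List.nil_append] at hA
    rw [hA]
    -- B side: the three reversals produce drop s ++ take s
    have h0 : 0 ≤ PySem.Int.mod k (F.length : Int) := PySem.Int.mod_nonneg _ hn
    have hlt : PySem.Int.mod k (F.length : Int) < (F.length : Int) := PySem.Int.mod_lt _ hn
    set s : Nat := (PySem.Int.mod k (F.length : Int)).toNat with hs
    have hsv : PySem.Int.mod k (F.length : Int) = (s : Int) := by omega
    have hsle : s ≤ F.length := by omega
    have hv1 : revLoop F 0 (PySem.Int.mod k (F.length : Int) - 1)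
        = (F.take s).reverse ++ F.drop s := by
      have := revLoop_spec (F.take s).length (F.take s) [] (F.drop s) le_rfl
      simp only [List.nil_append, List.take_append_drop, List.length_nil, Nat.cast_zero,
        zero_add] at this
      rw [hsv, show ((s : Int) - 1) = ((F.take s).length : Int) - 1 by
        simp [List.length_take, Nat.min_eq_left hsle]]
      simpa using this
    have hv2 : revLoop ((F.take s).reverse ++ F.drop s) (PySem.Int.mod k (F.length : Int))
          ((F.length : Int) - 1)
        = (F.take s).reverse ++ (F.drop s).reverse := by
      have := revLoop_spec (F.drop s).length (F.drop s) ((F.take s).reverse) [] le_rfl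
      simp only [List.append_nil] at this
      rw [hsv, show ((F.length : Int) - 1)
          = (((F.take s).reverse.length : Nat) : Int) + (((F.drop s).length : Nat) : Int) - 1 by
        simp [List.length_take, List.length_drop, Nat.min_eq_left hsle]; push_cast; omega,
        show ((s : Int)) = (((F.take s).reverse.length : Nat) : Int) by
        simp [List.length_take, Nat.min_eq_left hsle]]
      simpa using this
    have hv3 : revLoop ((F.take s).reverse ++ (F.drop s).reverse) 0 ((F.length : Int) - 1)
        = F.drop s ++ F.take s := by
      have := revLoop_spec ((F.take s).reverse ++ (F.drop s).reverse).length
        ((F.take s).reverse ++ (F.drop s).reverse) [] [] le_rfl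
      simp only [List.nil_append, List.append_nil, List.length_nil, Nat.cast_zero, zero_add] at this
      rw [show ((F.length : Int) - 1)
          = ((((F.take s).reverse ++ (F.drop s).reverse).length : Nat) : Int) - 1 by
        simp [List.length_take, List.length_drop, Nat.min_eq_left hsle]; push_cast; omega]
      rw [this]
      simp
    rw [hv1, hv2, hv3]
    -- the rotated buffer is A's gather list; scatter it
    have hrot : F.drop s ++ F.take s
        = (PySem.List.pyRange 0 (F.length : Int) 1).map
            (fun t => PySem.List.pyGetD F (PySem.Int.mod (t + k) (F.length : Int)) 0) := by
      have := lemRot F k hFe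
      rwa [hsv] at this
    have hB := lemB nums ([] : List Int) (F.drop s ++ F.take s)
    simp only [List.length_nil, Nat.cast_zero, List.nil_append] at hB
    rw [hB, hrot]
    have hcnt : (nums.countP (fun x => decide (x ≥ 0)) : Int) = (F.length : Int) := by
      rw [hF, List.countP_eq_length_filter]
    have := lemRef F (F.length : Int) k nums 0
    rw [hcnt] at this
    simp only [zero_add] at this
    rw [this]

-- ===== VERDICT (by name: the statement is the Claim_ definition above) =====
theorem rotateElements_spec : Claim_equal_rotateElements := by
  intro nums k _
  unfold Spec_rotateElements
  exact main nums k
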